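-- pv_equiv track=rewrite | github.com/dyj86137/hanlp_triple_extraction | triple_extraction.py | sort_triples_by_subject_order
-- ===== SOURCE A (Python) =====
-- def sort_triples_by_subject_order(triples, tokens):
--     """根据主体在句子中的出现顺序对三元组排序"""
--     def get_subject_position(triple):
--         subject = triple[0]
--         # 找到主体在句子中的最早出现位置
--         for i, token in enumerate(tokens):
--             if token == subject or token in subject or subject in token:
--                 return i
--         # 如果没找到精确匹配，尝试找部分匹配
--         for i, token in enumerate(tokens):
--             if any(word in token for word in subject.split()) or any(word in subject for word in token.split()):
--                 return i
--         return len(tokens)  # 如果都没找到，放到最后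
--
--     return sorted(triples, key=get_subject_position)
-- ===== SOURCE B (Python) =====
-- def sort_triples_by_subject_order(triples, tokens):
--     """Sort triples by subject's earliest matching token position (one scan per key)."""
--     def get_subject_position(triple):
--         subject = triple[0]
--         fallback = None
--         for i, token in enumerate(tokens):
--             if token == subject or token in subject or subject in token:
--                 return i
--             if fallback is None and (any(word in token for word in subject.split())
--                                      or any(word in subject for word in token.split())):
--                 fallback = i
--         return fallback if fallback is not None else len(tokens)
--
--     return sorted(triples, key=get_subject_position)
-- ===== Notes on version B (the rewrite author's own statement) =====
-- stated objective: alternative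
-- what changed: The key function makes a single pass over tokens, returning immediately on an exact/containment hit and recording the first split-word fallback index into an accumulator, instead of A's two sequential full scans.
import Mathlib
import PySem

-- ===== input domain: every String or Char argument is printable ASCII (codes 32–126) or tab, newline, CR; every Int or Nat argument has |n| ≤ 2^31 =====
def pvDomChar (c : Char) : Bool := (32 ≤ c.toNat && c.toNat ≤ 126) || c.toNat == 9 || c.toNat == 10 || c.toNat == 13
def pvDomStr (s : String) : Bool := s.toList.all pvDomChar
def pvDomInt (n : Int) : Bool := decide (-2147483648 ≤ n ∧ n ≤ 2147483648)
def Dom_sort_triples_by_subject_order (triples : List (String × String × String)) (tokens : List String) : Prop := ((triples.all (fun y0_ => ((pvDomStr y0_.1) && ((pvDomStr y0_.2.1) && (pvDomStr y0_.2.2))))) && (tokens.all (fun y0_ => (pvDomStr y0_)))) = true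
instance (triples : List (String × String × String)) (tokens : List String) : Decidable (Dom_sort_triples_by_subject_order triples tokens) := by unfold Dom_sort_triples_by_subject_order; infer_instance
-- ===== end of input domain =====

-- B changes the key function to a single pass over tokens (immediate return on the
-- containment test, first fallback index kept in an accumulator) instead of A's two
-- sequential scans; same result, same order (objective: alternative decomposition).

-- Conditions shared verbatim by both Pythons:
-- token == subject or token in subject or subject in token
def pvCond1 (subject token : String) : Bool :=
  token == subject || PySem.Str.isIn token subject || PySem.Str.isIn subject token
-- any(word in token for word in subject.split()) or any(word in subject for word in token.split())
def pvCond2 (subject token : String) : Bool :=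
  (PySem.Str.split₀ subject).any (fun word => PySem.Str.isIn word token)
    || (PySem.Str.split₀ token).any (fun word => PySem.Str.isIn word subject)

-- ===== PORT A =====
-- first loop: 'for i, token in enumerate(tokens): if cond1: return i'
def pvA_find1 (subject : String) : List (Int × String) → Option Int
  | [] => none
  | (i, token) :: rest =>
    if pvCond1 subject token then some i else pvA_find1 subject rest

-- second loop: 'for i, token in enumerate(tokens): if cond2: return i'
def pvA_find2 (subject : String) : List (Int × String) → Option Int
  | [] => none
  | (i, token) :: rest =>
    if pvCond2 subject token then some i else pvA_find2 subject rest

def pvA_key (tokens : List String) (triple : String × String × String) : Int :=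
  let subject := triple.1
  match pvA_find1 subject (PySem.List.enumerate tokens 0) with
  | some i => i
  | none =>
    match pvA_find2 subject (PySem.List.enumerate tokens 0) with
    | some i => i
    | none => (tokens.length : Int)

def sort_triples_by_subject_order (triples : List (String × String × String)) (tokens : List String) : List (String × String × String) :=
  PySem.List.sorted triples (pvA_key tokens) false

-- ===== PORT B =====
-- one pass: return i on cond1; record first cond2 index in 'fallback'; at the end
-- 'fallback if fallback is not None else len(tokens)'
def pvB_loop (subject : String) (l : List (Int × String)) (fallback : Option Int) (n : Int) : Int :=
  match l with
  | [] => fallback.getD n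
  | (i, token) :: rest =>
    if pvCond1 subject token then i
    else pvB_loop subject rest
      (if fallback.isNone && pvCond2 subject token then some i else fallback) n

def pvB_key (tokens : List String) (triple : String × String × String) : Int :=
  pvB_loop triple.1 (PySem.List.enumerate tokens 0) none (tokens.length : Int)

def sort_triples_by_subject_order_alt (triples : List (String × String × String)) (tokens : List String) : List (String × String × String) :=
  PySem.List.sorted triples (pvB_key tokens) false

-- ===== PRECONDITION & SPEC =====
def Spec_sort_triples_by_subject_order (triples : List (String × String × String)) (tokens : List String) (out : List (String × String × String)) : Prop := out = sort_triples_by_subject_order_alt triples tokens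
instance (triples : List (String × String × String)) (tokens : List String) (out : List (String × String × String)) : Decidable (Spec_sort_triples_by_subject_order triples tokens out) := by unfold Spec_sort_triples_by_subject_order; infer_instance

-- ===== CLAIM (what is proved, stated in full; the proofs are below) =====
def Claim_equal_sort_triples_by_subject_order : Prop := ∀ (triples : List (String × String × String)) (tokens : List String), Dom_sort_triples_by_subject_order triples tokens → Spec_sort_triples_by_subject_order triples tokens (sort_triples_by_subject_order triples tokens)

-- ===== LEMMAS AND PROOFS =====
-- B's single pass computes: first cond1 index, else (accumulated fallback <|> first cond2 index), else default.
theorem pvB_loop_eq (subject : String) (l : List (Int × String)) (fallback : Option Int) (n : Int) :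
    pvB_loop subject l fallback n =
      match pvA_find1 subject l with
      | some i => i
      | none => (fallback.or (pvA_find2 subject l)).getD n := by
  induction l generalizing fallback with
  | nil => simp [pvB_loop, pvA_find1, pvA_find2]
  | cons p rest ih =>
    obtain ⟨i, token⟩ := p
    by_cases h1 : pvCond1 subject token
    · simp [pvB_loop, pvA_find1, h1]
    · simp only [pvB_loop, pvA_find1, pvA_find2, h1, Bool.false_eq_true, ite_false, ih]
      cases fallback with
      | none => by_cases h2 : pvCond2 subject token <;> simp [h2]
      | some j => by_cases h2 : pvCond2 subject token <;> simp [h2]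

theorem pvB_key_eq_pvA_key (tokens : List String) (triple : String × String × String) :
    pvB_key tokens triple = pvA_key tokens triple := by
  unfold pvB_key pvA_key
  rw [pvB_loop_eq]
  cases h1 : pvA_find1 triple.1 (PySem.List.enumerate tokens 0) with
  | some i => simp [h1]
  | none =>
    cases h2 : pvA_find2 triple.1 (PySem.List.enumerate tokens 0) with
    | some i => simp [h1, h2]
    | none => simp [h1, h2]

-- ===== VERDICT (by name: the statement is the Claim_ definition above) =====
theorem sort_triples_by_subject_order_spec : Claim_equal_sort_triples_by_subject_order := by
  intro triples tokens _
  unfold Spec_sort_triples_by_subject_order sort_triples_by_subject_order sort_triples_by_subject_order_alt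
  have : pvA_key tokens = pvB_key tokens := by
    funext t; exact (pvB_key_eq_pvA_key tokens t).symm
  rw [this]
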